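-- pv_equiv track=rewrite | github.com/MSherry24/midiRadioactiveDecay | Player.py | adjustOctaves
-- ===== SOURCE A (Python) =====
-- def adjustOctaves(noteValue):
-- 	if (noteValue < 0):
-- 		while (noteValue < 0):
-- 			noteValue += 12
-- 	if (noteValue > 127):
-- 		while (noteValue > 127):
-- 			noteValue -= 12
-- 	return noteValue
-- ===== SOURCE B (Python) =====
-- def adjustOctaves(noteValue):
-- 	if (noteValue < 0):
-- 		return noteValue % 12
-- 	if (noteValue > 127):
-- 		return 116 + (noteValue - 116) % 12
-- 	return noteValue
-- ===== Notes on version B (the rewrite author's own statement) =====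
-- stated objective: faster
-- what changed: Replaces each while-loop of repeated octave shifts with a single closed-form modulo computation that lands directly in the target range.
import Mathlib
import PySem

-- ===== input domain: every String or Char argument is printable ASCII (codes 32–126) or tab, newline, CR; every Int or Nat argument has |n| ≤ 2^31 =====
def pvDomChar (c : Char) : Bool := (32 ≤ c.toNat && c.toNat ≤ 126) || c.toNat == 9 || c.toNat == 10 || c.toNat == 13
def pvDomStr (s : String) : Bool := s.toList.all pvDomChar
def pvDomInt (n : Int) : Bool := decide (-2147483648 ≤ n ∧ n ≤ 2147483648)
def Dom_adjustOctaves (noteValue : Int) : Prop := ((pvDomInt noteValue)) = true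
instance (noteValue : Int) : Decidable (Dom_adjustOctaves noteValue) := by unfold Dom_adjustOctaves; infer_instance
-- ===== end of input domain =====

-- B replaces each while-loop of repeated ±12 shifts with one closed-form modulo expression (faster: O(1) vs O(|n|)).

-- ===== PORT A =====
-- the `while (noteValue < 0): noteValue += 12` loop
def adjustUpLoop (noteValue : Int) : Int :=
  if noteValue < 0 then adjustUpLoop (noteValue + 12) else noteValue
termination_by (-noteValue).toNat
decreasing_by omega

-- the `while (noteValue > 127): noteValue -= 12` loop
def adjustDownLoop (noteValue : Int) : Int :=
  if noteValue > 127 then adjustDownLoop (noteValue - 12) else noteValue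
termination_by (noteValue - 127).toNat
decreasing_by omega

def adjustOctaves (noteValue : Int) : Int :=
  let n1 := if noteValue < 0 then adjustUpLoop noteValue else noteValue
  if n1 > 127 then adjustDownLoop n1 else n1

-- ===== PORT B =====
def adjustOctaves_alt (noteValue : Int) : Int :=
  if noteValue < 0 then PySem.Int.mod noteValue 12
  else if noteValue > 127 then 116 + PySem.Int.mod (noteValue - 116) 12
  else noteValue

-- ===== PRECONDITION & SPEC =====
def Spec_adjustOctaves (noteValue : Int) (out : Int) : Prop := out = adjustOctaves_alt noteValue
instance (noteValue : Int) (out : Int) : Decidable (Spec_adjustOctaves noteValue out) := by unfold Spec_adjustOctaves; infer_instance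

-- ===== CLAIM (what is proved, stated in full; the proofs are below) =====
def Claim_equal_adjustOctaves : Prop := ∀ (noteValue : Int), Dom_adjustOctaves noteValue → Spec_adjustOctaves noteValue (adjustOctaves noteValue)

-- ===== LEMMAS AND PROOFS =====

theorem adjustUpLoop_eq (n : Int) (h : n < 0) : adjustUpLoop n = n % 12 := by
  induction n using adjustUpLoop.induct with
  | case1 n hn ih =>
    rw [adjustUpLoop, if_pos hn]
    by_cases h2 : n + 12 < 0
    · rw [ih h2]; omega
    · rw [adjustUpLoop, if_neg h2]; omega
  | case2 n hn => omega

theorem adjustDownLoop_eq (n : Int) (h : n > 127) : adjustDownLoop n = 116 + (n - 116) % 12 := by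
  induction n using adjustDownLoop.induct with
  | case1 n hn ih =>
    rw [adjustDownLoop, if_pos hn]
    by_cases h2 : n - 12 > 127
    · rw [ih h2]; omega
    · rw [adjustDownLoop, if_neg h2]; omega
  | case2 n hn => omega

-- ===== VERDICT (by name: the statement is the Claim_ definition above) =====
theorem adjustOctaves_spec : Claim_equal_adjustOctaves := by
  intro n _
  unfold Spec_adjustOctaves adjustOctaves adjustOctaves_alt PySem.Int.mod
  have hf : ∀ a : Int, a.fmod 12 = a % 12 := fun a => Int.fmod_eq_emod_of_nonneg a (by norm_num)
  by_cases h : n < 0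
  · simp only [if_pos h, adjustUpLoop_eq n h, hf]
    have : ¬ (n % 12 > 127) := by omega
    rw [if_neg this]
  · rw [if_neg h, if_neg h]
    by_cases h2 : n > 127
    · rw [if_pos h2, if_pos h2, adjustDownLoop_eq n h2, hf]
    · rw [if_neg h2, if_neg h2]
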